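-- pv_equiv track=rewrite | github.com/sansten/ninai | backend/app/services/meta_agent/conflict_resolver.py | resolve_classification
-- ===== SOURCE A (Python) =====
-- _CLASSIFICATION_ORDER = {
--     "public": 0,
--     "internal": 1,
--     "confidential": 2,
--     "restricted": 3,
-- }
--
-- def resolve_classification(candidates: list[str]) -> str:
--     """Resolve to the most restrictive (max) classification.
--
--     Fail-closed: unknown values raise.
--     """
--
--     if not candidates:
--         return "internal"
--
--     normalized: list[str] = [str(c).strip().lower() for c in candidates if str(c).strip()]
--     if not normalized:
--         return "internal"
--
--     for c in normalized:
--         if c not in _CLASSIFICATION_ORDER: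
--             raise ValueError("Unknown classification")
--
--     return max(normalized, key=lambda c: _CLASSIFICATION_ORDER[c])
-- ===== SOURCE B (Python) =====
-- _CLASSIFICATION_ORDER = {
--     "public": 0,
--     "internal": 1,
--     "confidential": 2,
--     "restricted": 3,
-- }
--
-- def resolve_classification(candidates: list[str]) -> str:
--     """Resolve to the most restrictive classification by probing a fixed
--     most-to-least-restrictive ladder against the set of normalized labels."""
--     present = {str(c).strip().lower() for c in candidates if str(c).strip()}
--     if not present <= _CLASSIFICATION_ORDER.keys():
--         raise ValueError("Unknown classification")
--     for label in ("restricted", "confidential", "internal", "public"):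
--         if label in present:
--             return label
--     return "internal"
-- ===== Notes on version B (the rewrite author's own statement) =====
-- stated objective: idiomatic
-- what changed: Instead of folding max over the data with a rank-keyed max(), B builds the set of normalized labels once and walks the fixed ladder of the four classifications from most to least restrictive, returning the first one present in the set (defaulting to the internal level), with a set-subset fail-closed check replacing the per-element validation loop.
import Mathlib
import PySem

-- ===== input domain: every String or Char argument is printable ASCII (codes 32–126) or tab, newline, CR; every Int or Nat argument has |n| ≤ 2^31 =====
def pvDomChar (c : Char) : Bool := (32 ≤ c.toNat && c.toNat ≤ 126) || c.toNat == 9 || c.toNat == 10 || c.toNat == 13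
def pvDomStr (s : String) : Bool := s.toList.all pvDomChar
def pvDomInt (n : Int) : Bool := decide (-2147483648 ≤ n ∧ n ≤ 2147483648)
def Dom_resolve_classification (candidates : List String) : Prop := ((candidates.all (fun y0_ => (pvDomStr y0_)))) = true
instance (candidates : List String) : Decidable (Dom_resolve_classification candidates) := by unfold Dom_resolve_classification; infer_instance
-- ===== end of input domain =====

-- B probes the fixed most-to-least-restrictive ladder against the set of normalized labels
-- instead of folding max over the data (idiomatic; return value only, both raise on unknown labels).

-- ===== PORT A =====
def pvOrder : PySem.Dict String Int :=
  PySem.Dict.ofList [("public", 0), ("internal", 1), ("confidential", 2), ("restricted", 3)]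

def resolve_classification (candidates : List String) : String :=
  if candidates = [] then "internal"
  else
    let normalized : List String :=
      candidates.filterMap (fun c =>
        let s := PySem.Str.strip c
        if s = "" then none else some (PySem.Str.lower s))
    if normalized = [] then "internal"
    else if normalized.any (fun c => !(PySem.Dict.contains pvOrder c)) then
      ""  -- raise ValueError("Unknown classification"); excluded by Pre_
    else
      match PySem.List.max? normalized (fun c => PySem.Dict.getD pvOrder c 0) with
      | some m => m
      | none => ""  -- unreachable: normalized ≠ []

-- ===== PORT B =====
def pvPresent (candidates : List String) : PySem.Set String :=
  PySem.Set.ofList (candidates.filterMap (fun c =>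
    let s := PySem.Str.strip c
    if s = "" then none else some (PySem.Str.lower s)))

def resolve_classification_alt (candidates : List String) : String :=
  if !(PySem.Set.issubset (pvPresent candidates) (PySem.Dict.keys pvOrder)) then
    ""  -- raise ValueError("Unknown classification"); excluded by Pre_
  else
    match (["restricted", "confidential", "internal", "public"] : List String).find?
        (fun label => PySem.Set.contains (pvPresent candidates) label) with
    | some label => label
    | none => "internal"

-- ===== PRECONDITION & SPEC =====
-- Pre_ excludes exactly the inputs on which A raises ValueError: some candidate whose
-- stripped, lowercased form is nonempty and not one of the four known labels.
def Pre_resolve_classification (candidates : List String) : Prop :=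
  ∀ c ∈ candidates, PySem.Str.strip c = "" ∨
    PySem.Str.lower (PySem.Str.strip c) ∈ (["public", "internal", "confidential", "restricted"] : List String)
instance (candidates : List String) : Decidable (Pre_resolve_classification candidates) := by
  unfold Pre_resolve_classification; infer_instance

def pvWitness_resolve_classification : List String := [" Public", "RESTRICTED\t", "  ", "internal"]

def Spec_resolve_classification (candidates : List String) (out : String) : Prop := out = resolve_classification_alt candidates
instance (candidates : List String) (out : String) : Decidable (Spec_resolve_classification candidates out) := by unfold Spec_resolve_classification; infer_instance

-- ===== CLAIM (what is proved, stated in full; the proofs are below) =====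
def Claim_equal_resolve_classification : Prop := ∀ (candidates : List String), Dom_resolve_classification candidates → Pre_resolve_classification candidates → Spec_resolve_classification candidates (resolve_classification candidates)

-- ===== LEMMAS AND PROOFS =====

-- The core: for a nonempty list of known labels, the keyed max equals the ladder probe.
theorem pv_max_eq_ladder (N : List String)
    (hN : ∀ x ∈ N, x ∈ (["public", "internal", "confidential", "restricted"] : List String))
    (hne : N ≠ []) :
    (match PySem.List.max? N (fun c => PySem.Dict.getD pvOrder c 0) with
     | some m => m
     | none => "") =
    (match (["restricted", "confidential", "internal", "public"] : List String).find?
        (fun label => PySem.Set.contains (PySem.Set.ofList N) label) with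
     | some label => label
     | none => "internal") := by
  have hN' : ∀ x ∈ N, x = "public" ∨ x = "internal" ∨ x = "confidential" ∨ x = "restricted" := by
    intro x hx
    have := hN x hx
    simpa using this
  have r0 : PySem.Dict.getD pvOrder "public" 0 = 0 := by decide
  have r1 : PySem.Dict.getD pvOrder "internal" 0 = 1 := by decide
  have r2 : PySem.Dict.getD pvOrder "confidential" 0 = 2 := by decide
  have r3 : PySem.Dict.getD pvOrder "restricted" 0 = 3 := by decide
  obtain ⟨m, hm⟩ : ∃ m, PySem.List.max? N (fun c => PySem.Dict.getD pvOrder c 0) = some m := by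
    cases h : PySem.List.max? N (fun c => PySem.Dict.getD pvOrder c 0) with
    | none => exact absurd ((PySem.List.max?_eq_none_iff _ _).mp h) hne
    | some m => exact ⟨m, rfl⟩
  have hmem := PySem.List.max?_mem hm
  have hmax := PySem.List.max?_isMax hm
  rw [hm]
  by_cases h3 : "restricted" ∈ N
  · have hfind : (["restricted", "confidential", "internal", "public"] : List String).find?
        (fun label => PySem.Set.contains (PySem.Set.ofList N) label) = some "restricted" := by
      simp [List.find?, h3]
    rw [hfind]
    have h := hmax "restricted" h3
    rw [r3] at h
    rcases hN' m hmem with h' | h' | h' | h'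
    · rw [h', r0] at h; omega
    · rw [h', r1] at h; omega
    · rw [h', r2] at h; omega
    · exact h' ▸ rfl
  · by_cases h2 : "confidential" ∈ N
    · have hfind : (["restricted", "confidential", "internal", "public"] : List String).find?
          (fun label => PySem.Set.contains (PySem.Set.ofList N) label) = some "confidential" := by
        simp [List.find?, h3, h2]
      rw [hfind]
      have h := hmax "confidential" h2
      rw [r2] at h
      rcases hN' m hmem with h' | h' | h' | h'
      · rw [h', r0] at h; omega
      · rw [h', r1] at h; omega
      · exact h' ▸ rfl
      · rw [h'] at hmem; exact absurd hmem h3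
    · by_cases h1 : "internal" ∈ N
      · have hfind : (["restricted", "confidential", "internal", "public"] : List String).find?
            (fun label => PySem.Set.contains (PySem.Set.ofList N) label) = some "internal" := by
          simp [List.find?, h3, h2, h1]
        rw [hfind]
        have h := hmax "internal" h1
        rw [r1] at h
        rcases hN' m hmem with h' | h' | h' | h'
        · rw [h', r0] at h; omega
        · exact h' ▸ rfl
        · rw [h'] at hmem; exact absurd hmem h2
        · rw [h'] at hmem; exact absurd hmem h3
      · have h0 : "public" ∈ N := by
          obtain ⟨x, hx⟩ := List.exists_mem_of_ne_nil N hne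
          rcases hN' x hx with h' | h' | h' | h'
          · exact h' ▸ hx
          · rw [h'] at hx; exact absurd hx h1
          · rw [h'] at hx; exact absurd hx h2
          · rw [h'] at hx; exact absurd hx h3
        have hfind : (["restricted", "confidential", "internal", "public"] : List String).find?
            (fun label => PySem.Set.contains (PySem.Set.ofList N) label) = some "public" := by
          simp [List.find?, h3, h2, h1, h0]
        rw [hfind]
        rcases hN' m hmem with h' | h' | h' | h'
        · exact h'
        · rw [h'] at hmem; exact absurd hmem h1
        · rw [h'] at hmem; exact absurd hmem h2
        · rw [h'] at hmem; exact absurd hmem h3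

-- ===== VERDICT (by name: the statement is the Claim_ definition above) =====
theorem resolve_classification_spec : Claim_equal_resolve_classification := by
  intro cands _dom hpre
  simp only [Spec_resolve_classification, resolve_classification, resolve_classification_alt,
    pvPresent]
  set N := cands.filterMap (fun c =>
        let s := PySem.Str.strip c
        if s = "" then none else some (PySem.Str.lower s)) with hNdef
  have hN : ∀ x ∈ N, x ∈ (["public", "internal", "confidential", "restricted"] : List String) := by
    intro x hx
    rw [hNdef, List.mem_filterMap] at hx
    obtain ⟨c, hc, he⟩ := hx
    by_cases hs : PySem.Str.strip c = ""
    · simp [hs] at he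
    · simp only [hs] at he
      simp at he
      rcases hpre c hc with h | h
      · exact absurd h hs
      · rwa [he] at h
  by_cases hcnil : cands = []
  · subst hcnil
    decide
  · rw [if_neg hcnil]
    by_cases hNnil : N = []
    · rw [if_pos hNnil, hNnil]
      decide
    · rw [if_neg hNnil]
      have hN' : ∀ x ∈ N, x = "public" ∨ x = "internal" ∨ x = "confidential" ∨ x = "restricted" := by
        intro x hx
        have := hN x hx
        simpa using this
      have hknown : N.any (fun c => !(PySem.Dict.contains pvOrder c)) = false := by
        rw [List.any_eq_false]
        intro x hx
        rcases hN' x hx with h | h | h | h <;> rw [h] <;> decide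
      rw [hknown]
      have hsub : PySem.Set.issubset (PySem.Set.ofList N) (PySem.Dict.keys pvOrder) = true := by
        rw [PySem.Set.issubset_iff]
        intro x hx
        rw [PySem.Set.mem_ofList] at hx
        rcases hN' x hx with h | h | h | h <;> rw [h] <;> decide
      rw [hsub]
      simp only [Bool.not_true, Bool.false_eq_true, if_false]
      exact pv_max_eq_ladder N hN hNnil
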